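-- pv_equiv track=rewrite | github.com/ch0c0-msk/YandexAlgorithms | 1.0/HW2/taskE.py | findPlayerPlace
-- ===== SOURCE A (Python) =====
-- def findPlayerPlace(n, seq):
--     winnerThrow = seq[0]
--     winnerWasBefore = True
--     playerBestThrow = None
--     for i in range(1, len(seq) - 1):
--         if seq[i] > winnerThrow:
--             winnerThrow = seq[i]
--             winnerWasBefore = True
--             playerBestThrow = None
--         else:
--             if winnerWasBefore:
--                 if seq[i] % 10 == 5 and seq[i+1] < seq[i]:
--                     if playerBestThrow is None or playerBestThrow < seq[i]:
--                         playerBestThrow = seq[i]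
--
--     if not playerBestThrow:
--         return 0
--
--     res = 1
--     for item in seq:
--         if item > playerBestThrow:
--             res += 1
--
--     return res
-- ===== SOURCE B (Python) =====
-- def findPlayerPlace(n, seq):
--     if len(seq) <= 2:
--         return 0
--     m = max(seq[:-1])
--     p = seq.index(m)
--     cands = [seq[i] for i in range(p + 1, len(seq) - 1)
--              if seq[i] % 10 == 5 and seq[i + 1] < seq[i]]
--     if not cands:
--         return 0
--     best = max(cands)
--     return 1 + sum(x > best for x in seq)
-- ===== Notes on version B (the rewrite author's own statement) =====
-- stated objective: alternative
-- what changed: A's single reset-on-new-max pass is replaced by an explicit decomposition: compute max(seq[:-1]) and its first index with builtins, then collect qualifying throws from the suffix by comprehension, take their max and count larger items with sum().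
import Mathlib
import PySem

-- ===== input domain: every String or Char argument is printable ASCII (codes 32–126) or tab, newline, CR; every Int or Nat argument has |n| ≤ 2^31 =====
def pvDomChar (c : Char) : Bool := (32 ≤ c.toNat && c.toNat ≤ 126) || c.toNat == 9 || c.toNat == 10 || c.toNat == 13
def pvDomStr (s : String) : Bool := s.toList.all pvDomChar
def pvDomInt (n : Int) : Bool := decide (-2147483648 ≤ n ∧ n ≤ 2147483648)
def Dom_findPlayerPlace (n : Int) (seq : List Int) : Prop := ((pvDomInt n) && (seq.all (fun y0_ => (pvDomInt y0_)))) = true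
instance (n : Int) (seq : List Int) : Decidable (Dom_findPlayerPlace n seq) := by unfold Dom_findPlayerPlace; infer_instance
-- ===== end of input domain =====

-- B restates A as: locate the winner (max of seq[:-1], first occurrence), collect qualifying
-- throws from the suffix by comprehension, take their max, count larger items.  Objective:
-- alternative decomposition (same asymptotic cost).

-- ===== PORT A =====
-- loop body of A's first for-loop; state = (winnerThrow, winnerWasBefore, playerBestThrow)
def pvStepA (seq : List Int) (st : Int × Bool × Option Int) (i : Int) : Int × Bool × Option Int :=
  let v := PySem.List.pyGetD seq i 0
  if v > st.1 then (v, true, none)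
  else if st.2.1 then
    if PySem.Int.mod v 10 = 5 ∧ PySem.List.pyGetD seq (i + 1) 0 < v then
      match st.2.2 with
      | none => (st.1, st.2.1, some v)
      | some pb => if pb < v then (st.1, st.2.1, some v) else st
    else st
  else st

def findPlayerPlace (n : Int) (seq : List Int) : Int :=
  match PySem.List.pyGet? seq 0 with
  | none => 0  -- seq[0] raises IndexError on []; excluded by Pre_
  | some w0 =>
    let st := (PySem.List.pyRange 1 ((seq.length : Int) - 1) 1).foldl (pvStepA seq) (w0, true, none)
    match st.2.2 with
    | none => 0                 -- `if not playerBestThrow` on None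
    | some pb =>
      if pb = 0 then 0          -- `if not playerBestThrow` on 0
      else seq.foldl (fun res item => if item > pb then res + 1 else res) 1

-- ===== PORT B =====
-- the comprehension's filter+value for one index (same test both sources state)
def pvCand (seq : List Int) (i : Int) : Option Int :=
  let v := PySem.List.pyGetD seq i 0
  if PySem.Int.mod v 10 = 5 ∧ PySem.List.pyGetD seq (i + 1) 0 < v then some v else none

def findPlayerPlace_alt (n : Int) (seq : List Int) : Int :=
  if (seq.length : Int) ≤ 2 then 0
  else
    match PySem.List.max? (PySem.List.slice seq none (some (-1))) (fun x => x) with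
    | none => 0  -- unreachable: seq[:-1] nonempty when len(seq) > 2
    | some m =>
      match PySem.List.index? seq m with
      | none => 0  -- unreachable: m ∈ seq
      | some p =>
        let cands := (PySem.List.pyRange ((p : Int) + 1) ((seq.length : Int) - 1) 1).filterMap (pvCand seq)
        match PySem.List.max? cands (fun x => x) with
        | none => 0
        | some best => 1 + (seq.map (fun x => if x > best then (1 : Int) else 0)).sum

-- ===== PRECONDITION & SPEC =====
-- Pre_ excludes only the empty list, on which A raises IndexError at seq[0].
def Pre_findPlayerPlace (n : Int) (seq : List Int) : Prop := seq ≠ []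
instance (n : Int) (seq : List Int) : Decidable (Pre_findPlayerPlace n seq) := by unfold Pre_findPlayerPlace; infer_instance
def pvWitness_findPlayerPlace : Int × List Int := (0, [25, 15, 3, 7])


def Spec_findPlayerPlace (n : Int) (seq : List Int) (out : Int) : Prop := out = findPlayerPlace_alt n seq
instance (n : Int) (seq : List Int) (out : Int) : Decidable (Spec_findPlayerPlace n seq out) := by unfold Spec_findPlayerPlace; infer_instance

-- ===== CLAIM (what is proved, stated in full; the proofs are below) =====
def Claim_equal_findPlayerPlace : Prop := ∀ (n : Int) (seq : List Int), Dom_findPlayerPlace n seq → Pre_findPlayerPlace n seq → Spec_findPlayerPlace n seq (findPlayerPlace n seq)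

-- ===== LEMMAS AND PROOFS =====

-- A's running "best so far" update as a fold (value-equal to Python's max of the candidates)
def pvObest (l : List Int) : Option Int :=
  l.foldl (fun acc v => match acc with | none => some v | some b => if b < v then some v else acc) none

lemma pvObest_append_singleton (l : List Int) (v : Int) :
    pvObest (l ++ [v]) = match pvObest l with
      | none => some v
      | some b => if b < v then some v else some b := by
  unfold pvObest
  rw [List.foldl_append]
  cases h : List.foldl (fun acc v => match acc with | none => some v | some b => if b < v then some v else acc) none l <;> simp

lemma pvObest_foldl_some (t : List Int) (b : Int) :
    t.foldl (fun acc v => match acc with | none => some v | some b => if b < v then some v else acc) (some b)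
      = some (t.foldl max b) := by
  induction t generalizing b with
  | nil => rfl
  | cons v t' ih =>
    have hmax : (if b < v then some v else some b) = some (max b v) := by
      split_ifs with h
      · rw [max_eq_right h.le]
      · rw [max_eq_left (not_lt.1 h)]
    simp only [List.foldl_cons]
    rw [hmax, ih]

lemma pvObest_eq_max? (l : List Int) :
    PySem.List.max? l (fun x => x) = pvObest l := by
  cases l with
  | nil => simp [pvObest, PySem.List.max?_eq_none_iff]
  | cons x t => rw [PySem.List.max?_id_cons]; unfold pvObest; rw [List.foldl_cons, pvObest_foldl_some]

lemma pvObest_mem_aux (l : List Int) (acc : Option Int) (b : Int)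
    (h : l.foldl (fun acc v => match acc with | none => some v | some b => if b < v then some v else acc) acc = some b) :
    b ∈ l ∨ acc = some b := by
  induction l generalizing acc with
  | nil => exact Or.inr h
  | cons v t ih =>
    rcases ih _ h with hm | hm
    · exact Or.inl (List.mem_cons_of_mem _ hm)
    · cases acc with
      | none => simp at hm; exact Or.inl (by simp [hm])
      | some b0 =>
        simp only at hm
        split at hm
        · exact Or.inl (by simp_all)
        · exact Or.inr hm

lemma pvObest_mem (l : List Int) (b : Int) (h : pvObest l = some b) : b ∈ l := by
  rcases pvObest_mem_aux l none b h with hm | hm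
  · exact hm
  · simp at hm

lemma pvCand_mod (seq : List Int) (i v : Int) (h : pvCand seq i = some v) :
    PySem.Int.mod v 10 = 5 := by
  unfold pvCand at h
  simp only at h
  split at h
  · cases h; tauto
  · cases h

lemma pvCount (l : List Int) (b init : Int) :
    l.foldl (fun r x => if x > b then r + 1 else r) init
      = init + (l.map (fun x => if x > b then (1 : Int) else 0)).sum := by
  induction l generalizing init with
  | nil => simp
  | cons x t ih => simp only [List.foldl_cons, List.map_cons, List.sum_cons, ih]; split <;> ring

lemma pvGetD_cons_nat (x : Int) (t : List Int) (k : Nat) (hk : k < t.length) :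
    PySem.List.pyGetD (x :: t) ((k : Int) + 1) 0 = t[k] := by
  have h1 : ((k : Int) + 1) = ((k + 1 : Nat) : Int) := by push_cast; ring
  rw [h1, PySem.List.pyGetD_natCast]
  simp [List.getD_eq_getElem?_getD, List.getElem?_eq_getElem hk]

lemma pv_inv (x : Int) (t : List Int) (k : Nat) (hk : k < t.length) :
    ∃ p : Nat, PySem.List.index? (x :: t) ((t.take k).foldl max x) = some p ∧ p ≤ k ∧
      (PySem.List.pyRange 1 ((k : Int) + 1) 1).foldl (pvStepA (x :: t)) (x, true, none)
        = ((t.take k).foldl max x, true,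
           pvObest ((PySem.List.pyRange ((p : Int) + 1) ((k : Int) + 1) 1).filterMap (pvCand (x :: t)))) := by
  induction k with
  | zero =>
    refine ⟨0, ?_, le_refl 0, ?_⟩
    · simp only [List.take_zero, List.foldl_nil]
      rw [PySem.List.index?_eq_some_iff]
      exact ⟨[], t, by simp, rfl, by simp⟩
    · rw [PySem.List.pyRange_one_eq_nil (by omega)]
      simp [pvObest]
  | succ k ih =>
    obtain ⟨p, hidx, hple, hfold⟩ := ih (by omega)
    have htk : (t.take (k + 1)) = t.take k ++ [t[k]] := by
      rw [List.take_succ, List.getElem?_eq_getElem (by omega : k < t.length)]; rfl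
    have hmaxsucc : (t.take (k + 1)).foldl max x = max ((t.take k).foldl max x) t[k] := by
      rw [htk, List.foldl_append]; rfl
    have hrange : PySem.List.pyRange 1 (((k + 1 : Nat) : Int) + 1) 1
        = PySem.List.pyRange 1 ((k : Int) + 1) 1 ++ [(k : Int) + 1] := by
      have : (((k + 1 : Nat) : Int) + 1) = ((k : Int) + 1) + 1 := by push_cast; ring
      rw [this, PySem.List.pyRange_one_succ_right (by omega)]
    have hv := pvGetD_cons_nat x t k (by omega)
    by_cases hgt : ((t.take k).foldl max x) < t[k]
    · -- new maximum at index k+1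
      refine ⟨k + 1, ?_, le_refl _, ?_⟩
      · -- first index of the new max is k+1
        rw [hmaxsucc, max_eq_right hgt.le]
        rw [PySem.List.index?_eq_some_iff]
        have hdk : t.drop k = t[k] :: t.drop (k + 1) := List.drop_eq_getElem_cons (by omega)
        refine ⟨x :: t.take k, t.drop (k + 1), ?_, ?_, ?_⟩
        · simp only [List.cons_append]
          rw [← hdk, List.take_append_drop]
        · simp only [List.length_cons, List.length_take]
          omega
        · intro hmem
          have hle := (PySem.List.le_foldl_max (t.take k) x)
          rcases List.mem_cons.1 hmem with h | h
          · omega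
          · exact absurd (hle.2 _ h) (by omega)
      · rw [hrange, List.foldl_append, hfold]
        simp only [List.foldl_cons, List.foldl_nil]
        unfold pvStepA
        simp only [hv, gt_iff_lt]
        rw [if_pos hgt]
        rw [hmaxsucc, max_eq_right hgt.le]
        rw [PySem.List.pyRange_one_eq_nil (by push_cast; omega)]
        simp [pvObest]
    · -- old maximum persists
      push_neg at hgt
      refine ⟨p, ?_, by omega, ?_⟩
      · rw [hmaxsucc, max_eq_left hgt]; exact hidx
      · rw [hrange, List.foldl_append, hfold]
        simp only [List.foldl_cons, List.foldl_nil]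
        rw [hmaxsucc, max_eq_left hgt]
        have hcrange : PySem.List.pyRange ((p : Int) + 1) (((k + 1 : Nat) : Int) + 1) 1
            = PySem.List.pyRange ((p : Int) + 1) ((k : Int) + 1) 1 ++ [(k : Int) + 1] := by
          have : (((k + 1 : Nat) : Int) + 1) = ((k : Int) + 1) + 1 := by push_cast; ring
          rw [this, PySem.List.pyRange_one_succ_right (by omega)]
        rw [hcrange, List.filterMap_append]
        unfold pvStepA
        simp only [hv, if_neg (not_lt.2 hgt)]
        by_cases hc : PySem.Int.mod t[k] 10 = 5 ∧ PySem.List.pyGetD (x :: t) ((k : Int) + 1 + 1) 0 < t[k]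
        · have hcand : pvCand (x :: t) ((k : Int) + 1) = some t[k] := by
            unfold pvCand; simp only [hv]; rw [if_pos hc]
          simp only [List.filterMap_cons, List.filterMap_nil, hcand]
          rw [pvObest_append_singleton]
          simp only [if_pos hc, if_pos rfl]
          cases hob : pvObest ((PySem.List.pyRange ((p : Int) + 1) ((k : Int) + 1) 1).filterMap (pvCand (x :: t))) with
          | none => simp
          | some pb => by_cases hpb : pb < t[k] <;> simp [hpb]
        · have hcand : pvCand (x :: t) ((k : Int) + 1) = none := by
            unfold pvCand; simp only [hv]; rw [if_neg hc]
          simp only [List.filterMap_cons, List.filterMap_nil, hcand, List.append_nil]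
          rw [if_neg hc]
          simp

-- ===== VERDICT (by name: the statement is the Claim_ definition above) =====
theorem findPlayerPlace_spec : Claim_equal_findPlayerPlace := by
  intro n seq _ hpre
  unfold Spec_findPlayerPlace
  cases seq with
  | nil => exact absurd rfl hpre
  | cons x t =>
    by_cases hlen : t.length < 2
    · -- lists of length 1 or 2: A's loop is empty, B's guard fires; both return 0
      unfold findPlayerPlace findPlayerPlace_alt
      rw [PySem.List.pyGet?_zero_cons]
      have h0 : PySem.List.pyRange 1 (((x :: t).length : Int) - 1) 1 = [] := by
        apply PySem.List.pyRange_one_eq_nil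
        simp only [List.length_cons]
        push_cast
        omega
      rw [h0]
      simp only [List.foldl_nil]
      rw [if_pos (by simp only [List.length_cons]; push_cast; omega)]
    · push_neg at hlen
      obtain ⟨p, hidx, hple, hfold⟩ := pv_inv x t (t.length - 1) (by omega)
      have hcast : (((x :: t).length : Int) - 1) = (((t.length - 1 : Nat) : Int) + 1) := by
        simp only [List.length_cons]
        push_cast [Nat.cast_sub (by omega : 1 ≤ t.length)]
        omega
      unfold findPlayerPlace findPlayerPlace_alt
      rw [PySem.List.pyGet?_zero_cons, hcast]
      dsimp only
      rw [hfold]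
      rw [if_neg (by simp only [List.length_cons]; push_cast; omega)]
      rw [PySem.List.slice_to_neg_one, List.dropLast_eq_take]
      have hdl : (x :: t).take ((x :: t).length - 1) = x :: t.take (t.length - 1) := by
        simp only [List.length_cons, Nat.add_sub_cancel]
        cases t with
        | nil => simp at hlen
        | cons y t' => rfl
      rw [hdl, PySem.List.max?_id_cons]
      dsimp only
      rw [hidx]
      dsimp only
      rw [pvObest_eq_max?]
      cases hob : pvObest ((PySem.List.pyRange ((p : Int) + 1) (((t.length - 1 : Nat) : Int) + 1) 1).filterMap (pvCand (x :: t))) with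
      | none => rfl
      | some pb =>
        have hpbmem := pvObest_mem _ _ hob
        obtain ⟨i, _, hc⟩ := List.mem_filterMap.1 hpbmem
        have hmod := pvCand_mod _ _ _ hc
        have hpb0 : pb ≠ 0 := by
          intro h
          rw [h] at hmod
          exact absurd hmod (by decide)
        simp only [if_neg hpb0]
        rw [pvCount]
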